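-- pv_equiv track=rewrite | github.com/M9GLiquid/Mermaid-Integration | apis/astar-api/astar-api.py | _is_free_for_robot
-- ===== SOURCE A (Python) =====
-- from typing import Deque, Dict, Iterable, List, Optional, Tuple
--
-- OBSTACLE_VALUES = {1, 5}  # walls, threats
--
-- def _is_free_for_robot(center: Tuple[int, int], grid: List[List[int]], robot_radius: int = 1) -> bool:
--     """Check if a (2*radius+1)x(2*radius+1) robot fits with its center at 'center'."""
--     x, y = center
--     rows, cols = len(grid), len(grid[0])
--
--     for dy in range(-robot_radius, robot_radius + 1):
--         for dx in range(-robot_radius, robot_radius + 1):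
--             nx, ny = x + dx, y + dy
--             if nx < 0 or ny < 0 or nx >= cols or ny >= rows:
--                 return False
--             if grid[ny][nx] in OBSTACLE_VALUES:
--                 return False
--     return True
-- ===== SOURCE B (Python) =====
-- OBSTACLE_VALUES = {1, 5}  # walls, threats
--
--
-- def _is_free_for_robot(center, grid, robot_radius=1):
--     """Summed-area table: closed-form window-fit test, then one 4-corner rectangle query."""
--     x, y = center
--     rows, cols = len(grid), len(grid[0])
--     r = robot_radius
--     if r < 0:
--         return True  # empty window
--     if x - r < 0 or y - r < 0 or x + r >= cols or y + r >= rows: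
--         return False
--     # P[i][j] = number of obstacle cells in the rectangle grid[:i] x columns[:j]
--     prev = [0] * (cols + 1)
--     P = [prev]
--     for row in grid:
--         cur = [0]
--         for j in range(cols):
--             cur.append(cur[-1] + prev[j + 1] - prev[j]
--                        + (1 if row[j] in OBSTACLE_VALUES else 0))
--         P.append(cur)
--         prev = cur
--     return (P[y + r + 1][x + r + 1] - P[y - r][x + r + 1]
--             - P[y + r + 1][x - r] + P[y - r][x - r]) == 0
-- ===== Notes on version B (the rewrite author's own statement) =====
-- stated objective: alternative
-- what changed: A scans the (2r+1)^2 window cell by cell with per-cell bounds checks and early returns; B does one closed-form window-fit test and then builds a summed-area table (2D prefix sums of the obstacle indicator) over the grid and answers with a single 4-corner inclusion-exclusion rectangle-count query, with no per-cell test of the window at all.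
-- outside the precondition, e.g. on _is_free_for_robot((1, 1), [[5, 0, 1, 0], [5, 0, 1], [5, 0, 0, 1]], 1): A returns False, B raises IndexError
import Mathlib
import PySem

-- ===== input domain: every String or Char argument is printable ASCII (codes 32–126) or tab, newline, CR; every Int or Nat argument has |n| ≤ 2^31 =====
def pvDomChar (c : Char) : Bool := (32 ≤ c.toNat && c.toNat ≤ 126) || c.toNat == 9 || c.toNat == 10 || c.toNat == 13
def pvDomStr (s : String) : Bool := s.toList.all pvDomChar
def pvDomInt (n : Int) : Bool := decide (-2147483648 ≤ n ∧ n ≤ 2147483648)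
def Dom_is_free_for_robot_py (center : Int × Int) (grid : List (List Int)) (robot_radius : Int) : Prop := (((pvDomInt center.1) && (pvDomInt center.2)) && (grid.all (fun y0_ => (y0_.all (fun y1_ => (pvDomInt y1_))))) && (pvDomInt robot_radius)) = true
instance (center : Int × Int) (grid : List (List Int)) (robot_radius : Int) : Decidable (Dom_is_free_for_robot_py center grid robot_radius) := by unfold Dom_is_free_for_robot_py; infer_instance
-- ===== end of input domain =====

-- B replaces A's per-cell bounds-checked window scan by a closed-form window-fit test plus a
-- summed-area table (2D prefix sums of the obstacle indicator) answered with one 4-corner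
-- rectangle-count query (objective: alternative).

-- ===== PORT A =====
-- inner 'for dx in range(-robot_radius, robot_radius + 1)' with its two early 'return False';
-- the fuel is the exact iteration count of the Python range
def pvInnerA (grid : List (List Int)) (x y cols rows dy : Int) : Nat → Int → Bool
  | 0, _ => true
  | n + 1, dx =>
    if x + dx < 0 ∨ y + dy < 0 ∨ x + dx ≥ cols ∨ y + dy ≥ rows then false
    else if PySem.List.pyGetD (PySem.List.pyGetD grid (y + dy) []) (x + dx) 0 = 1 ∨
            PySem.List.pyGetD (PySem.List.pyGetD grid (y + dy) []) (x + dx) 0 = 5 then false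
    else pvInnerA grid x y cols rows dy n (dx + 1)

-- outer 'for dy in range(-robot_radius, robot_radius + 1)'; a 'return False' of the body stops it
def pvOuterA (grid : List (List Int)) (x y cols rows lo : Int) (m : Nat) : Nat → Int → Bool
  | 0, _ => true
  | n + 1, dy =>
    if pvInnerA grid x y cols rows dy m lo then pvOuterA grid x y cols rows lo m n (dy + 1)
    else false

def is_free_for_robot_py (center : Int × Int) (grid : List (List Int)) (robot_radius : Int) : Bool :=
  let x := center.1
  let y := center.2
  let rows : Int := (grid.length : Int)
  let cols : Int := (((PySem.List.pyGet? grid 0).getD []).length : Int)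
  let n : Nat := ((robot_radius + 1) - (-robot_radius)).toNat  -- length of range(-r, r+1)
  pvOuterA grid x y cols rows (-robot_radius) n n (-robot_radius)

-- ===== PORT B =====
-- 'cur = [0]; for j in range(cols): cur.append(cur[-1] + prev[j+1] - prev[j] + (1 if row[j] in OBSTACLE_VALUES else 0))'
-- (row[j] as pyGetD: inside Pre_ every accessed index is in range, where pyGetD is exact)
def pvRowStep (row prev : List Int) (cols : Int) : List Int :=
  (PySem.List.pyRange 0 cols 1).foldl (fun cur j =>
    cur ++ [PySem.List.pyGetD cur (-1) 0 + PySem.List.pyGetD prev (j + 1) 0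
            - PySem.List.pyGetD prev j 0 +
            (if PySem.List.pyGetD row j 0 = 1 ∨ PySem.List.pyGetD row j 0 = 5 then 1 else 0)]) [0]

-- 'prev = [0]*(cols+1); P = [prev]; for row in grid: cur = …; P.append(cur); prev = cur'
-- (cols is a length, so 0 ≤ cols and the .toNat in the replicate is exact for [0]*(cols+1))
def pvBuildP (grid : List (List Int)) (cols : Int) : List (List Int) × List Int :=
  grid.foldl (fun st row =>
    let cur := pvRowStep row st.2 cols
    (st.1 ++ [cur], cur))
    ([List.replicate (cols + 1).toNat 0], List.replicate (cols + 1).toNat 0)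

def is_free_for_robot_py_alt (center : Int × Int) (grid : List (List Int)) (robot_radius : Int) : Bool :=
  let x := center.1
  let y := center.2
  let rows : Int := (grid.length : Int)
  let cols : Int := (((PySem.List.pyGet? grid 0).getD []).length : Int)
  let r := robot_radius
  if r < 0 then true  -- empty window
  else if x - r < 0 ∨ y - r < 0 ∨ x + r ≥ cols ∨ y + r ≥ rows then false
  else
    let P := (pvBuildP grid cols).1
    decide (PySem.List.pyGetD (PySem.List.pyGetD P (y + r + 1) []) (x + r + 1) 0
      - PySem.List.pyGetD (PySem.List.pyGetD P (y - r) []) (x + r + 1) 0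
      - PySem.List.pyGetD (PySem.List.pyGetD P (y + r + 1) []) (x - r) 0
      + PySem.List.pyGetD (PySem.List.pyGetD P (y - r) []) (x - r) 0 = 0)

-- ===== PRECONDITION & SPEC =====
-- Pre_ excludes the empty grid (Python A raises IndexError at grid[0]) and ragged grids whose
-- scan starts inside the grid while some row is shorter than row 0: there A's row-major scan can
-- raise IndexError, and B's summed-area build always does; some ragged grids on which A happens
-- to return False before reaching a short row are excluded with them (B raises there).
def Pre_is_free_for_robot_py (center : Int × Int) (grid : List (List Int)) (robot_radius : Int) : Prop :=
  grid ≠ [] ∧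
    (robot_radius < 0 ∨
     center.1 - robot_radius < 0 ∨ center.2 - robot_radius < 0 ∨
     center.1 - robot_radius ≥ ((grid.headD []).length : Int) ∨
     center.2 - robot_radius ≥ (grid.length : Int) ∨
     ∀ row ∈ grid, (grid.headD []).length ≤ row.length)
instance (center : Int × Int) (grid : List (List Int)) (robot_radius : Int) : Decidable (Pre_is_free_for_robot_py center grid robot_radius) := by unfold Pre_is_free_for_robot_py; infer_instance
def pvWitness_is_free_for_robot_py : (Int × Int) × List (List Int) × Int := ((0, 0), [[0]], 0)

def Spec_is_free_for_robot_py (center : Int × Int) (grid : List (List Int)) (robot_radius : Int) (out : Bool) : Prop := out = is_free_for_robot_py_alt center grid robot_radius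
instance (center : Int × Int) (grid : List (List Int)) (robot_radius : Int) (out : Bool) : Decidable (Spec_is_free_for_robot_py center grid robot_radius out) := by unfold Spec_is_free_for_robot_py; infer_instance

-- ===== CLAIM (what is proved, stated in full; the proofs are below) =====
def Claim_equal_is_free_for_robot_py : Prop := ∀ (center : Int × Int) (grid : List (List Int)) (robot_radius : Int), Dom_is_free_for_robot_py center grid robot_radius → Pre_is_free_for_robot_py center grid robot_radius → Spec_is_free_for_robot_py center grid robot_radius (is_free_for_robot_py center grid robot_radius)

-- ===== LEMMAS AND PROOFS =====

-- the obstacle indicator and the prefix-count functions the table computes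
def pvObs (v : Int) : Int := if v = 1 ∨ v = 5 then 1 else 0

def pvRowCnt (row : List Int) (j : Int) : Int :=
  ((PySem.List.pyRange 0 j 1).map (fun b => pvObs (PySem.List.pyGetD row b 0))).sum

def pvRectCnt (grid : List (List Int)) (i j : Int) : Int :=
  ((PySem.List.pyRange 0 i 1).map (fun a => pvRowCnt (PySem.List.pyGetD grid a []) j)).sum

theorem pvObs_nonneg (v : Int) : 0 ≤ pvObs v := by
  unfold pvObs; split_ifs <;> omega

theorem pvRowCnt_zero (row : List Int) : pvRowCnt row 0 = 0 := by
  simp [pvRowCnt, PySem.List.pyRange_one_eq_nil (le_refl (0:Int))]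

theorem pvRowCnt_succ (row : List Int) (j : Int) (hj : 0 ≤ j) :
    pvRowCnt row (j + 1) = pvRowCnt row j + pvObs (PySem.List.pyGetD row j 0) := by
  unfold pvRowCnt
  rw [PySem.List.pyRange_one_succ_right hj]
  simp

theorem pvRectCnt_zero (grid : List (List Int)) (j : Int) : pvRectCnt grid 0 j = 0 := by
  simp [pvRectCnt, PySem.List.pyRange_one_eq_nil (le_refl (0:Int))]

theorem pvRectCnt_succ (grid : List (List Int)) (i j : Int) (hi : 0 ≤ i) :
    pvRectCnt grid (i + 1) j = pvRectCnt grid i j + pvRowCnt (PySem.List.pyGetD grid i []) j := by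
  unfold pvRectCnt
  rw [PySem.List.pyRange_one_succ_right hi]
  simp

theorem pvRectCnt_col_zero (grid : List (List Int)) (i : Int) : pvRectCnt grid i 0 = 0 := by
  unfold pvRectCnt
  have : ∀ a, pvRowCnt (PySem.List.pyGetD grid a []) 0 = 0 := fun a => pvRowCnt_zero _
  simp [this]

-- the inner fold of pvRowStep maintains: cur has length j+1 and holds prev[i] - prev[0] + rowCnt i
theorem pvRowStep_inv (row prev : List Int) (cols : Int) :
    ∀ (n : Nat) (j : Int) (cur : List Int), j + (n : Int) = cols → 0 ≤ j →
      cur.length = j.toNat + 1 →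
      (∀ i : Int, 0 ≤ i → i ≤ j →
        PySem.List.pyGetD cur i 0
          = PySem.List.pyGetD prev i 0 - PySem.List.pyGetD prev 0 0 + pvRowCnt row i) →
      (((PySem.List.pyRange j cols 1).foldl (fun cur j =>
          cur ++ [PySem.List.pyGetD cur (-1) 0 + PySem.List.pyGetD prev (j + 1) 0
            - PySem.List.pyGetD prev j 0 +
            (if PySem.List.pyGetD row j 0 = 1 ∨ PySem.List.pyGetD row j 0 = 5 then 1 else 0)]) cur).length
          = cols.toNat + 1 ∧
       ∀ i : Int, 0 ≤ i → i ≤ cols →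
        PySem.List.pyGetD ((PySem.List.pyRange j cols 1).foldl (fun cur j =>
          cur ++ [PySem.List.pyGetD cur (-1) 0 + PySem.List.pyGetD prev (j + 1) 0
            - PySem.List.pyGetD prev j 0 +
            (if PySem.List.pyGetD row j 0 = 1 ∨ PySem.List.pyGetD row j 0 = 5 then 1 else 0)]) cur) i 0
          = PySem.List.pyGetD prev i 0 - PySem.List.pyGetD prev 0 0 + pvRowCnt row i) := by
  intro n
  induction n with
  | zero =>
    intro j cur hn hj hlen hvals
    have hje : j = cols := by omega
    rw [PySem.List.pyRange_one_eq_nil (by omega)]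
    subst hje
    exact ⟨by simpa [hj] using hlen, fun i h1 h2 => hvals i h1 h2⟩
  | succ n ih =>
    intro j cur hn hj hlen hvals
    rw [PySem.List.pyRange_one_cons (by omega)]
    simp only [List.foldl_cons]
    -- value appended this step
    have hne : cur ≠ [] := by intro h; rw [h] at hlen; simp at hlen
    have hlast : PySem.List.pyGetD cur (-1) 0 = PySem.List.pyGetD cur j 0 := by
      rw [PySem.List.pyGetD_neg_one cur 0 hne,
        PySem.List.pyGetD_eq_getElem cur 0 (by omega) (by omega)]
      rw [List.getLast_eq_getElem]
      congr 1
      omega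
    have hstep :
        PySem.List.pyGetD cur (-1) 0 + PySem.List.pyGetD prev (j + 1) 0
          - PySem.List.pyGetD prev j 0 +
          (if PySem.List.pyGetD row j 0 = 1 ∨ PySem.List.pyGetD row j 0 = 5 then 1 else 0)
          = PySem.List.pyGetD prev (j + 1) 0 - PySem.List.pyGetD prev 0 0 + pvRowCnt row (j + 1) := by
      rw [hlast, hvals j hj (le_refl j), pvRowCnt_succ row j hj]
      unfold pvObs
      ring
    set v := PySem.List.pyGetD cur (-1) 0 + PySem.List.pyGetD prev (j + 1) 0
          - PySem.List.pyGetD prev j 0 +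
          (if PySem.List.pyGetD row j 0 = 1 ∨ PySem.List.pyGetD row j 0 = 5 then 1 else 0) with hv
    refine ih (j + 1) (cur ++ [v]) (by omega) (by omega) (by simp [hlen]; omega) ?_
    intro i h1 h2
    rcases lt_or_eq_of_le h2 with hlt | heq
    · -- index stays in the old part
      have : PySem.List.pyGetD (cur ++ [v]) i 0 = PySem.List.pyGetD cur i 0 := by
        rw [PySem.List.pyGetD_eq_getElem (cur ++ [v]) 0 h1
            (by simp only [List.length_append, List.length_singleton, hlen]; push_cast; omega),
            PySem.List.pyGetD_eq_getElem cur 0 h1 (by omega)]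
        rw [List.getElem_append_left (by omega)]
      rw [this]
      exact hvals i h1 (by omega)
    · subst heq
      have hput : PySem.List.pyGetD (cur ++ [v]) (j + 1) 0 = v := by
        rw [PySem.List.pyGetD_eq_getElem (cur ++ [v]) 0 (by omega)
          (by simp only [List.length_append, List.length_singleton, hlen]; push_cast; omega)]
        rw [List.getElem_append_right (by omega)]
        simp
      rw [hput]
      exact hstep

theorem pvRowStep_spec (row prev : List Int) (cols : Int) (hc : 0 ≤ cols) :
    (pvRowStep row prev cols).length = cols.toNat + 1 ∧
    ∀ i : Int, 0 ≤ i → i ≤ cols →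
      PySem.List.pyGetD (pvRowStep row prev cols) i 0
        = PySem.List.pyGetD prev i 0 - PySem.List.pyGetD prev 0 0 + pvRowCnt row i := by
  have h := pvRowStep_inv row prev cols cols.toNat 0 [0] (by omega) (le_refl 0) (by simp)
    (by
      intro i h1 h2
      have : i = 0 := by omega
      subst this
      simp [pvRowCnt_zero])
  exact h

-- the outer fold maintains the table: P[i][j] = pvRectCnt grid i j
theorem pvBuildP_inv (grid : List (List Int)) (cols : Int) (hc : 0 ≤ cols) :
    ∀ (gs : List (List Int)) (k : Nat) (P0 : List (List Int)) (prev : List Int),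
      grid.drop k = gs →
      prev.length = cols.toNat + 1 →
      (∀ j : Int, 0 ≤ j → j ≤ cols →
        PySem.List.pyGetD prev j 0 = pvRectCnt grid (k : Int) j) →
      P0.length = k + 1 →
      (∀ i : Int, 0 ≤ i → i ≤ (k : Int) → ∀ j : Int, 0 ≤ j → j ≤ cols →
        PySem.List.pyGetD (PySem.List.pyGetD P0 i []) j 0 = pvRectCnt grid i j) →
      ∀ i : Int, 0 ≤ i → i ≤ (grid.length : Int) → ∀ j : Int, 0 ≤ j → j ≤ cols →
        PySem.List.pyGetD (PySem.List.pyGetD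
          (gs.foldl (fun st row =>
            let cur := pvRowStep row st.2 cols
            (st.1 ++ [cur], cur)) (P0, prev)).1 i []) j 0 = pvRectCnt grid i j := by
  intro gs
  induction gs with
  | nil =>
    intro k P0 prev hdrop hplen hprev hPlen hP i h1 h2 j h3 h4
    have hk : grid.length ≤ k := by
      by_contra h
      have := List.drop_eq_nil_iff.mp hdrop
      omega
    simp only [List.foldl_nil]
    exact hP i h1 (by omega) j h3 h4
  | cons row gs ih =>
    intro k P0 prev hdrop hplen hprev hPlen hP i h1 h2 j h3 h4
    have hklt : k < grid.length := by
      by_contra h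
      have : grid.drop k = [] := List.drop_eq_nil_iff.mpr (by omega)
      rw [this] at hdrop; exact (List.cons_ne_nil _ _) hdrop.symm
    have hrow : PySem.List.pyGetD grid (k : Int) [] = row := by
      have h0 : (grid.drop k)[0]? = some row := by rw [hdrop]; rfl
      rw [List.getElem?_drop] at h0
      rw [PySem.List.pyGetD_eq_getElem grid [] (by omega) (by omega)]
      have : grid[(k : Int).toNat]? = some grid[(k : Int).toNat] := List.getElem?_eq_getElem (by omega)
      simp only [Int.toNat_natCast] at *
      rw [Nat.add_zero] at h0
      rw [h0] at this
      exact (Option.some.injEq _ _).mp this.symm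
    obtain ⟨hclen, hcvals⟩ := pvRowStep_spec row prev cols hc
    have hcur : ∀ j : Int, 0 ≤ j → j ≤ cols →
        PySem.List.pyGetD (pvRowStep row prev cols) j 0 = pvRectCnt grid ((k : Int) + 1) j := by
      intro j h5 h6
      rw [hcvals j h5 h6, hprev j h5 h6, hprev 0 (le_refl 0) hc,
        pvRectCnt_col_zero, pvRectCnt_succ grid (k : Int) j (by omega), hrow]
      ring
    simp only [List.foldl_cons]
    have hdrop' : grid.drop (k + 1) = gs := by
      have hdd : (grid.drop k).drop 1 = grid.drop (k + 1) := by
        rw [List.drop_drop]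
      rw [← hdd, hdrop]
      rfl
    refine ih (k + 1) (P0 ++ [pvRowStep row prev cols]) (pvRowStep row prev cols)
      hdrop' hclen (by push_cast; exact hcur) (by simp [hPlen]) ?_ i h1 h2 j h3 h4
    intro i h5 h6 j h7 h8
    rcases lt_or_eq_of_le h6 with hlt | heq
    · have : PySem.List.pyGetD (P0 ++ [pvRowStep row prev cols]) i []
          = PySem.List.pyGetD P0 i [] := by
        rw [PySem.List.pyGetD_eq_getElem (P0 ++ [pvRowStep row prev cols]) [] h5
            (by simp only [List.length_append, List.length_singleton, hPlen]; push_cast; omega),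
            PySem.List.pyGetD_eq_getElem P0 [] h5 (by rw [hPlen]; push_cast; omega)]
        rw [List.getElem_append_left (by omega)]
      rw [this]
      exact hP i h5 (by omega) j h7 h8
    · have : PySem.List.pyGetD (P0 ++ [pvRowStep row prev cols]) i []
          = pvRowStep row prev cols := by
        rw [PySem.List.pyGetD_eq_getElem (P0 ++ [pvRowStep row prev cols]) [] h5
            (by simp only [List.length_append, List.length_singleton, hPlen]; push_cast; omega)]
        rw [List.getElem_append_right (by omega)]
        simp
      rw [this, heq]
      push_cast
      exact hcur j h7 h8
  
theorem pvBuildP_spec (grid : List (List Int)) (cols : Int) (hc : 0 ≤ cols) :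
    ∀ i : Int, 0 ≤ i → i ≤ (grid.length : Int) → ∀ j : Int, 0 ≤ j → j ≤ cols →
      PySem.List.pyGetD (PySem.List.pyGetD (pvBuildP grid cols).1 i []) j 0 = pvRectCnt grid i j := by
  have hrep : ∀ j : Int, 0 ≤ j → j ≤ cols →
      PySem.List.pyGetD (List.replicate (cols + 1).toNat (0:Int)) j 0 = pvRectCnt grid 0 j := by
    intro j h1 h2
    rw [PySem.List.pyGetD_eq_getElem (List.replicate (cols + 1).toNat (0:Int)) 0 h1 (by simp; omega),
      List.getElem_replicate, pvRectCnt_zero]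
  have h := pvBuildP_inv grid cols hc grid 0 [List.replicate (cols + 1).toNat 0]
    (List.replicate (cols + 1).toNat 0) (by simp) (by simp; omega)
    (by exact_mod_cast hrep) (by simp)
    (by
      intro i h1 h2 j h3 h4
      have : i = 0 := by omega
      subst this
      simpa using hrep j h3 h4)
  exact h

-- a rectangle count difference is the count over the half-open row interval
theorem sum_map_sub_int {α : Type} (l : List α) (f g : α → Int) :
    (l.map f).sum - (l.map g).sum = (l.map (fun a => f a - g a)).sum := by
  induction l with
  | nil => simp
  | cons a l ih => simp [List.map_cons, List.sum_cons]; omega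

theorem pvRowCnt_interval (row : List Int) (j1 j2 : Int) (h1 : 0 ≤ j1) (h2 : j1 ≤ j2) :
    pvRowCnt row j2 - pvRowCnt row j1
      = ((PySem.List.pyRange j1 j2 1).map (fun b => pvObs (PySem.List.pyGetD row b 0))).sum := by
  unfold pvRowCnt
  rw [PySem.List.pyRange_one_append 0 j1 j2 h1 h2, List.map_append, List.sum_append]
  ring

theorem pvRectCnt_interval (grid : List (List Int)) (i1 i2 j : Int) (h1 : 0 ≤ i1) (h2 : i1 ≤ i2) :
    pvRectCnt grid i2 j - pvRectCnt grid i1 j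
      = ((PySem.List.pyRange i1 i2 1).map (fun a => pvRowCnt (PySem.List.pyGetD grid a []) j)).sum := by
  unfold pvRectCnt
  rw [PySem.List.pyRange_one_append 0 i1 i2 h1 h2, List.map_append, List.sum_append]
  ring

-- a zero sum of nonnegative terms has only zero terms
theorem sum_nonneg_eq_zero {l : List Int} (hnn : ∀ c ∈ l, 0 ≤ c) (h : l.sum = 0) :
    ∀ c ∈ l, c = 0 := by
  induction l with
  | nil => intro c hc; simp at hc
  | cons a l ih =>
    have hl : ∀ c ∈ l, 0 ≤ c := fun c hc => hnn c (List.mem_cons_of_mem a hc)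
    have hs : 0 ≤ l.sum := List.sum_nonneg hl
    have ha : 0 ≤ a := hnn a (List.mem_cons_self ..)
    rw [List.sum_cons] at h
    intro c hc
    rcases List.mem_cons.mp hc with rfl | hc
    · omega
    · exact ih hl (by omega) c hc

-- a sum of the 0/1 obstacle indicator is zero iff no cell of the span is an obstacle
theorem sum_obs_eq_zero_iff (l : List Int) (f : Int → Int) :
    ((l.map (fun b => pvObs (f b))).sum = 0
      ↔ ∀ b ∈ l, ¬ (f b = 1 ∨ f b = 5)) := by
  induction l with
  | nil => simp
  | cons a l ih =>
    simp only [List.map_cons, List.sum_cons, List.mem_cons]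
    have h0 : 0 ≤ pvObs (f a) := pvObs_nonneg _
    have hsum : 0 ≤ (l.map (fun b => pvObs (f b))).sum := by
      apply List.sum_nonneg
      intro x hx
      obtain ⟨b, _, rfl⟩ := List.mem_map.mp hx
      exact pvObs_nonneg _
    constructor
    · intro h
      have ha : pvObs (f a) = 0 := by omega
      have hl : (l.map (fun b => pvObs (f b))).sum = 0 := by omega
      refine fun b hb => ?_
      rcases hb with rfl | hb
      · unfold pvObs at ha; split_ifs at ha with hcond
        · omega
        · exact hcond
      · exact ih.mp hl b hb
    · intro h
      have ha : pvObs (f a) = 0 := by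
        unfold pvObs; split_ifs with hcond
        · exact absurd hcond (h a (Or.inl rfl))
        · rfl
      rw [ha, ih.mpr (fun b hb => h b (Or.inr hb))]
      omega

-- the inner loop of A succeeds iff every cell of the remaining row span passes both checks
theorem pvInnerA_iff (grid : List (List Int)) (x y cols rows dy : Int) :
    ∀ (n : Nat) (dx : Int),
      (pvInnerA grid x y cols rows dy n dx = true ↔
        ∀ d, dx ≤ d → d < dx + (n : Int) →
          (¬ (x + d < 0 ∨ y + dy < 0 ∨ x + d ≥ cols ∨ y + dy ≥ rows) ∧
           ¬ (PySem.List.pyGetD (PySem.List.pyGetD grid (y + dy) []) (x + d) 0 = 1 ∨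
              PySem.List.pyGetD (PySem.List.pyGetD grid (y + dy) []) (x + d) 0 = 5))) := by
  intro n
  induction n with
  | zero =>
    intro dx
    constructor
    · intro _ d h1 h2; omega
    · intro _; trivial
  | succ n ih =>
    intro dx
    rw [pvInnerA]
    split_ifs with h2 h3
    · simp only [false_iff]
      intro hall
      exact (hall dx (le_refl dx) (by omega)).1 h2
    · simp only [false_iff]
      intro hall
      exact (hall dx (le_refl dx) (by omega)).2 h3
    · rw [ih (dx + 1)]
      constructor
      · intro hrec d hd1 hd2
        rcases eq_or_lt_of_le hd1 with rfl | hlt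
        · exact ⟨h2, h3⟩
        · exact hrec d (by omega) (by omega)
      · intro hall d hd1 hd2
        exact hall d (by omega) (by omega)

-- the outer loop of A succeeds iff every remaining row's inner loop would succeed
theorem pvOuterA_iff (grid : List (List Int)) (x y cols rows lo : Int) (m : Nat) :
    ∀ (n : Nat) (dy : Int),
      (pvOuterA grid x y cols rows lo m n dy = true ↔
        ∀ d, dy ≤ d → d < dy + (n : Int) → pvInnerA grid x y cols rows d m lo = true) := by
  intro n
  induction n with
  | zero =>
    intro dy
    constructor
    · intro _ d h1 h2; omega
    · intro _; trivial
  | succ n ih =>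
    intro dy
    rw [pvOuterA]
    split_ifs with h1
    · rw [ih (dy + 1)]
      constructor
      · intro hrec d hd1 hd2
        rcases eq_or_lt_of_le hd1 with rfl | hlt
        · exact h1
        · exact hrec d (by omega) (by omega)
      · intro hall d hd1 hd2
        exact hall d (by omega) (by omega)
    · simp only [false_iff]
      intro hall
      exact h1 (hall dy (le_refl dy) (by omega))

theorem is_free_for_robot_py_eq (center : Int × Int) (grid : List (List Int)) (robot_radius : Int) :
    is_free_for_robot_py center grid robot_radius
      = is_free_for_robot_py_alt center grid robot_radius := by
  obtain ⟨x, y⟩ := center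
  set r := robot_radius with hr
  set rows : Int := (grid.length : Int) with hrows
  set cols : Int := (((PySem.List.pyGet? grid 0).getD []).length : Int) with hcols
  have hrows0 : 0 ≤ rows := by rw [hrows]; positivity
  have hcols0 : 0 ≤ cols := by rw [hcols]; positivity
  -- characterise A: true iff every cell of the window passes both checks
  have hAiff : (is_free_for_robot_py (x, y) grid r = true)
      ↔ ∀ dy, -r ≤ dy → dy < r + 1 → ∀ dx, -r ≤ dx → dx < r + 1 →
          (¬ (x + dx < 0 ∨ y + dy < 0 ∨ x + dx ≥ cols ∨ y + dy ≥ rows) ∧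
           ¬ (PySem.List.pyGetD (PySem.List.pyGetD grid (y + dy) []) (x + dx) 0 = 1 ∨
              PySem.List.pyGetD (PySem.List.pyGetD grid (y + dy) []) (x + dx) 0 = 5)) := by
    have hA : is_free_for_robot_py (x, y) grid r
        = pvOuterA grid x y cols rows (-r) ((r + 1) - (-r)).toNat ((r + 1) - (-r)).toNat (-r) := rfl
    rw [hA, pvOuterA_iff grid x y cols rows (-r) ((r + 1) - (-r)).toNat ((r + 1) - (-r)).toNat (-r)]
    constructor
    · intro h dy h1 h2 dx h3 h4
      exact (pvInnerA_iff grid x y cols rows dy ((r + 1) - (-r)).toNat (-r)).mp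
        (h dy h1 (by omega)) dx h3 (by omega)
    · intro h dy h1 h2
      refine (pvInnerA_iff grid x y cols rows dy ((r + 1) - (-r)).toNat (-r)).mpr ?_
      intro dx h3 h4
      exact h dy h1 (by omega) dx h3 (by omega)
  -- characterise B: true iff (r < 0, or) the window fits and the rectangle query counts no obstacle
  have hBiff : (is_free_for_robot_py_alt (x, y) grid r = true)
      ↔ (r < 0 ∨ (¬ (x - r < 0 ∨ y - r < 0 ∨ x + r ≥ cols ∨ y + r ≥ rows) ∧
          ∀ ny, y - r ≤ ny → ny < y + r + 1 → ∀ nx, x - r ≤ nx → nx < x + r + 1 →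
            ¬ (PySem.List.pyGetD (PySem.List.pyGetD grid ny []) nx 0 = 1 ∨
               PySem.List.pyGetD (PySem.List.pyGetD grid ny []) nx 0 = 5))) := by
    show ((if r < 0 then true
      else if x - r < 0 ∨ y - r < 0 ∨ x + r ≥ cols ∨ y + r ≥ rows then false
      else
        decide (PySem.List.pyGetD (PySem.List.pyGetD (pvBuildP grid cols).1 (y + r + 1) []) (x + r + 1) 0
          - PySem.List.pyGetD (PySem.List.pyGetD (pvBuildP grid cols).1 (y - r) []) (x + r + 1) 0
          - PySem.List.pyGetD (PySem.List.pyGetD (pvBuildP grid cols).1 (y + r + 1) []) (x - r) 0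
          + PySem.List.pyGetD (PySem.List.pyGetD (pvBuildP grid cols).1 (y - r) []) (x - r) 0 = 0)) = true) ↔ _
    split_ifs with h1 h2
    · simp [h1]
    · simp only [false_iff]
      rintro (h | ⟨hb, _⟩)
      · exact h1 h
      · exact hb h2
    · -- in the fit branch: replace the table entries by pvRectCnt, then read the count
      push Not at h2
      obtain ⟨hx0, hy0, hxc, hyr⟩ := h2
      have hPij := pvBuildP_spec grid cols hcols0
      rw [hPij (y + r + 1) (by omega) (by omega) (x + r + 1) (by omega) (by omega),
          hPij (y - r) (by omega) (by omega) (x + r + 1) (by omega) (by omega),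
          hPij (y + r + 1) (by omega) (by omega) (x - r) (by omega) (by omega),
          hPij (y - r) (by omega) (by omega) (x - r) (by omega) (by omega)]
      have hcnt :
          pvRectCnt grid (y + r + 1) (x + r + 1) - pvRectCnt grid (y - r) (x + r + 1)
            - pvRectCnt grid (y + r + 1) (x - r) + pvRectCnt grid (y - r) (x - r)
          = ((PySem.List.pyRange (y - r) (y + r + 1) 1).map (fun a =>
              ((PySem.List.pyRange (x - r) (x + r + 1) 1).map (fun b =>
                pvObs (PySem.List.pyGetD (PySem.List.pyGetD grid a []) b 0))).sum)).sum := by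
        have e1 := pvRectCnt_interval grid (y - r) (y + r + 1) (x + r + 1) (by omega) (by omega)
        have e2 := pvRectCnt_interval grid (y - r) (y + r + 1) (x - r) (by omega) (by omega)
        have e3 : pvRectCnt grid (y + r + 1) (x + r + 1) - pvRectCnt grid (y - r) (x + r + 1)
            - pvRectCnt grid (y + r + 1) (x - r) + pvRectCnt grid (y - r) (x - r)
            = (pvRectCnt grid (y + r + 1) (x + r + 1) - pvRectCnt grid (y - r) (x + r + 1))
              - (pvRectCnt grid (y + r + 1) (x - r) - pvRectCnt grid (y - r) (x - r)) := by ring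
        rw [e3, e1, e2, sum_map_sub_int]
        congr 1
        apply List.map_congr_left
        intro a _
        exact pvRowCnt_interval (PySem.List.pyGetD grid a []) (x - r) (x + r + 1) (by omega) (by omega)
      rw [hcnt]
      simp only [decide_eq_true_eq]
      constructor
      · intro h
        refine Or.inr ⟨by omega, ?_⟩
        intro ny hn1 hn2 nx hm1 hm2
        -- outer sum of nonneg inner sums is 0, hence each inner sum is 0
        have houter : ∀ a ∈ PySem.List.pyRange (y - r) (y + r + 1) 1,
            ((PySem.List.pyRange (x - r) (x + r + 1) 1).map (fun b =>
              pvObs (PySem.List.pyGetD (PySem.List.pyGetD grid a []) b 0))).sum = 0 := by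
          intro a ha
          have hnn : ∀ c ∈ (PySem.List.pyRange (y - r) (y + r + 1) 1).map (fun a =>
              ((PySem.List.pyRange (x - r) (x + r + 1) 1).map (fun b =>
                pvObs (PySem.List.pyGetD (PySem.List.pyGetD grid a []) b 0))).sum), 0 ≤ c := by
            intro c hc
            obtain ⟨a', _, rfl⟩ := List.mem_map.mp hc
            apply List.sum_nonneg
            intro z hz
            obtain ⟨b, _, rfl⟩ := List.mem_map.mp hz
            exact pvObs_nonneg _
          exact sum_nonneg_eq_zero hnn h _ (List.mem_map.mpr ⟨a, ha, rfl⟩)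
        have := (sum_obs_eq_zero_iff (PySem.List.pyRange (x - r) (x + r + 1) 1)
            (fun b => PySem.List.pyGetD (PySem.List.pyGetD grid ny []) b 0)).mp
          (houter ny (PySem.List.mem_pyRange_one.mpr ⟨hn1, hn2⟩))
        exact this nx (PySem.List.mem_pyRange_one.mpr ⟨hm1, hm2⟩)
      · rintro (h | ⟨_, h⟩)
        · omega
        · apply List.sum_eq_zero
          intro c hc
          obtain ⟨a, ha, rfl⟩ := List.mem_map.mp hc
          obtain ⟨ha1, ha2⟩ := PySem.List.mem_pyRange_one.mp ha
          exact (sum_obs_eq_zero_iff _ _).mpr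
            (fun b hb => by
              obtain ⟨hb1, hb2⟩ := PySem.List.mem_pyRange_one.mp hb
              exact h a ha1 ha2 b hb1 hb2)
  -- both sides reduce to the same proposition
  have key : (is_free_for_robot_py (x, y) grid r = true)
      ↔ (is_free_for_robot_py_alt (x, y) grid r = true) := by
    rw [hAiff, hBiff]
    constructor
    · intro h
      by_cases hneg : r < 0
      · exact Or.inl hneg
      · refine Or.inr ⟨?_, ?_⟩
        · intro hbad
          rcases hbad with h1 | h1 | h1 | h1
          · have := (h 0 (by omega) (by omega) (-r) (by omega) (by omega)).1
            omega
          · have := (h (-r) (by omega) (by omega) 0 (by omega) (by omega)).1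
            omega
          · have := (h 0 (by omega) (by omega) r (by omega) (by omega)).1
            omega
          · have := (h r (by omega) (by omega) 0 (by omega) (by omega)).1
            omega
        · intro ny h3 h4 nx h5 h6
          have := (h (ny - y) (by omega) (by omega) (nx - x) (by omega) (by omega)).2
          have h7 : y + (ny - y) = ny := by omega
          have h8 : x + (nx - x) = nx := by omega
          rw [h7, h8] at this
          exact this
    · rintro (h | ⟨h1, h2⟩)
      · intro dy hd1 hd2
        omega
      · intro dy hd1 hd2 dx hd3 hd4
        refine ⟨by omega, ?_⟩
        exact h2 (y + dy) (by omega) (by omega) (x + dx) (by omega) (by omega)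
  cases hAv : is_free_for_robot_py (x, y) grid r <;>
    cases hBv : is_free_for_robot_py_alt (x, y) grid r <;>
      simp [hAv, hBv] at key ⊢

-- ===== VERDICT (by name: the statement is the Claim_ definition above) =====
theorem is_free_for_robot_py_spec : Claim_equal_is_free_for_robot_py := by
  intro center grid robot_radius _ _
  exact is_free_for_robot_py_eq center grid robot_radius
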